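-- pv_equiv track=rewrite | github.com/hardcodedpassword/RFLink-alt-Gateway | RFLinkTools.py | encode_manchester
-- ===== SOURCE A (Python) =====
-- def encode_manchester(bits, pulse_time: int, preamble):
--     # convert the bit-string to symbols
--
--     if len(preamble) == 0:
--         raise Exception("preamble is required for encoding")
--     else:
--         if len(preamble) % 2 == 0:
--             # even number of pulses so the last pulse must be a LOW
--             last_bit = "0"
--         else:
--             # odd number of pulses so the last pulse must be a HIGH
--             last_bit = "1"
--         s = 0
--
--     pulses = preamble.copy()
--
--     for i in range(s, len(bits)):
--         b = bits[i]
--         if b != last_bit: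
--             pulses[-1] += pulse_time
--             pulses.append(pulse_time)
--         else:
--             pulses.append(pulse_time)
--             pulses.append(pulse_time)
--         last_bit = b
--
--     return pulses
-- ===== SOURCE B (Python) =====
-- def encode_manchester(bits, pulse_time: int, preamble):
--     # Run-length decomposition: build the symbol sequence seed+bits, compute the
--     # lengths of its runs of equal symbols, then emit pulses run by run.
--     s = ("0" if len(preamble) % 2 == 0 else "1") + bits
--     runs = []
--     cur, cnt = s[0], 1
--     for c in s[1:]:
--         if c == cur:
--             cnt += 1
--         else:
--             runs.append(cnt)
--             cur, cnt = c, 1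
--     runs.append(cnt)
--     pulses = preamble.copy()
--     pulses += [pulse_time] * (2 * (runs[0] - 1))
--     for k in runs[1:]:
--         pulses[-1] += pulse_time
--         pulses += [pulse_time] * (2 * k - 1)
--     return pulses
-- ===== Notes on version B (the rewrite author's own statement) =====
-- stated objective: alternative
-- what changed: B replaces A's per-bit branch on a mutable last_bit state with a run-length decomposition: it computes the run lengths of the symbol sequence seed+bits first, then emits the pulse train run by run (one boundary merge per run, 2k-1 plain pulses inside a run).
import Mathlib
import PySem

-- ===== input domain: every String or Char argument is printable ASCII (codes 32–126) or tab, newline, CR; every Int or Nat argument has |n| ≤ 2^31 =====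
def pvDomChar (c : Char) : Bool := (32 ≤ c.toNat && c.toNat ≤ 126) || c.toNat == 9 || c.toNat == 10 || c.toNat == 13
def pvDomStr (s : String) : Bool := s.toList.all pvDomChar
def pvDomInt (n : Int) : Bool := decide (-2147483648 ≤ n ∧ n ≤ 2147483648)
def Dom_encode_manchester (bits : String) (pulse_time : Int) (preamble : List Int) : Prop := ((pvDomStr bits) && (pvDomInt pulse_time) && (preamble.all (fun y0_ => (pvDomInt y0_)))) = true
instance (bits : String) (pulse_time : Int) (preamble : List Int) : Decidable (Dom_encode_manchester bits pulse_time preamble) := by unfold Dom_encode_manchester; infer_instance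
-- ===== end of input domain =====

-- B re-derives the pulse train from the run lengths of the symbol sequence seed+bits
-- (an alternative decomposition, same cost); equivalence proved on nonempty preambles.

-- Python's `pulses[-1] += pulse_time` (both sources contain this statement)
def pyAddLast (l : List Int) (x : Int) : List Int :=
  match l with
  | [] => []
  | [a] => [a + x]
  | a :: rest => a :: pyAddLast rest x

-- ===== PORT A =====
-- the loop body of A, verbatim: branch on `b != last_bit`
def stepA (pt : Int) (st : Char × List Int) (b : Char) : Char × List Int :=
  if b ≠ st.1 then (b, pyAddLast st.2 pt ++ [pt]) else (b, st.2 ++ [pt, pt])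

-- A raises on an empty preamble (excluded by Pre_); the port returns [] there.
def encode_manchester (bits : String) (pulse_time : Int) (preamble : List Int) : List Int :=
  if preamble.length == 0 then []
  else
    let last_bit : Char := if preamble.length % 2 == 0 then '0' else '1'
    (bits.toList.foldl (stepA pulse_time) (last_bit, preamble)).2

-- ===== PORT B =====
-- B's first loop body: extend the current run or flush it
def stepR (st : List Int × Char × Int) (c : Char) : List Int × Char × Int :=
  if c == st.2.1 then (st.1, st.2.1, st.2.2 + 1) else (st.1 ++ [st.2.2], c, 1)

-- B's second loop body: merge the run boundary, then 2k-1 plain pulses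
def stepP (pt : Int) (pulses : List Int) (k : Int) : List Int :=
  pyAddLast pulses pt ++ List.replicate (2 * k - 1).toNat pt

def encode_manchester_alt (bits : String) (pulse_time : Int) (preamble : List Int) : List Int :=
  let s := (if preamble.length % 2 == 0 then '0' else '1') :: bits.toList
  let st := List.foldl stepR ([], s.head!, 1) s.tail
  let runs := st.1 ++ [st.2.2]
  List.foldl (stepP pulse_time)
    (preamble ++ List.replicate (2 * (runs.head! - 1)).toNat pulse_time) runs.tail

-- ===== PRECONDITION & SPEC =====
-- A raises ("preamble is required for encoding") when the preamble is empty.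
def Pre_encode_manchester (bits : String) (pulse_time : Int) (preamble : List Int) : Prop := preamble ≠ []
instance (bits : String) (pulse_time : Int) (preamble : List Int) : Decidable (Pre_encode_manchester bits pulse_time preamble) := by unfold Pre_encode_manchester; infer_instance
def pvWitness_encode_manchester : String × Int × List Int := ("0110", 300, [500, 900])

def Spec_encode_manchester (bits : String) (pulse_time : Int) (preamble : List Int) (out : List Int) : Prop := out = encode_manchester_alt bits pulse_time preamble
instance (bits : String) (pulse_time : Int) (preamble : List Int) (out : List Int) : Decidable (Spec_encode_manchester bits pulse_time preamble out) := by unfold Spec_encode_manchester; infer_instance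

-- ===== CLAIM (what is proved, stated in full; the proofs are below) =====
def Claim_equal_encode_manchester : Prop := ∀ (bits : String) (pulse_time : Int) (preamble : List Int), Dom_encode_manchester bits pulse_time preamble → Pre_encode_manchester bits pulse_time preamble → Spec_encode_manchester bits pulse_time preamble (encode_manchester bits pulse_time preamble)

-- ===== LEMMAS AND PROOFS =====

-- functional run-length encoding: lengths of the runs of `cur^cnt ++ s`
def rle (cur : Char) (cnt : Int) : List Char → List Int
  | [] => [cnt]
  | c :: cs => if c == cur then rle cur (cnt + 1) cs else cnt :: rle c 1 cs

lemma rleAcc (s : List Char) : ∀ (acc : List Int) (cur : Char) (cnt : Int),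
    (s.foldl stepR (acc, cur, cnt)).1 ++ [(s.foldl stepR (acc, cur, cnt)).2.2]
      = acc ++ rle cur cnt s := by
  induction s with
  | nil => intro acc cur cnt; simp [rle]
  | cons c cs ih =>
    intro acc cur cnt
    by_cases h : c == cur
    · simp [stepR, rle, h, ih]
    · simp [stepR, rle, h, ih]

lemma rle_cons (cur : Char) (cnt : Int) (s : List Char) :
    ∃ k ks, rle cur cnt s = k :: ks ∧ cnt ≤ k := by
  induction s generalizing cur cnt with
  | nil => exact ⟨cnt, [], rfl, le_refl _⟩
  | cons c cs ih =>
    by_cases h : c == cur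
    · obtain ⟨k, ks, hr, hk⟩ := ih cur (cnt + 1)
      exact ⟨k, ks, by simp [rle, h, hr], by omega⟩
    · exact ⟨cnt, rle c 1 cs, by simp [rle, h], le_refl _⟩

lemma main_lemma (pt : Int) (s : List Char) : ∀ (cur : Char) (cnt : Int) (p : List Int)
    (k : Int) (ks : List Int), rle cur cnt s = k :: ks →
    ks.foldl (stepP pt) (p ++ List.replicate (2 * (k - cnt)).toNat pt)
      = (s.foldl (stepA pt) (cur, p)).2 := by
  induction s with
  | nil =>
    intro cur cnt p k ks hr
    simp only [rle] at hr
    injection hr with h1 h2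
    subst h1; subst h2
    simp
  | cons c cs ih =>
    intro cur cnt p k ks hr
    by_cases h : c == cur
    · have hc : c = cur := by simpa using h
      simp only [rle, h, if_pos] at hr
      obtain ⟨k', ks', hr', hk'⟩ := rle_cons cur (cnt + 1) cs
      rw [hr'] at hr
      injection hr with h1 h2
      subst k; subst ks
      have e1 : (2 * (k' - cnt)).toNat = ((2 * (k' - (cnt + 1))).toNat) + 1 + 1 := by omega
      have := ih cur (cnt + 1) (p ++ [pt, pt]) k' ks' hr'
      rw [List.foldl_cons] at *
      simp only [stepA, hc, ne_eq, not_true_eq_false, if_false] at this ⊢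
      rw [← this, e1, List.replicate_succ, List.replicate_succ]
      simp
    · have hc : c ≠ cur := by simpa using h
      simp only [rle, h, Bool.false_eq_true] at hr
      injection hr with h1 h2
      subst h1; subst h2
      obtain ⟨k', ks', hr', hk'⟩ := rle_cons c 1 cs
      have := ih c 1 (pyAddLast p pt ++ [pt]) k' ks' hr'
      have e1 : (2 * k' - 1).toNat = ((2 * (k' - 1)).toNat) + 1 := by omega
      rw [hr', List.foldl_cons, List.foldl_cons]
      simp only [stepA, hc, ne_eq, not_false_iff, if_pos]
      rw [← this]
      simp only [stepP, e1, List.replicate_succ]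
      simp

-- ===== VERDICT (by name: the statement is the Claim_ definition above) =====
theorem encode_manchester_spec : Claim_equal_encode_manchester := by
  intro bits pt pre _ hpre
  show encode_manchester bits pt pre = encode_manchester_alt bits pt pre
  have hlen : ¬ (pre.length == 0) = true := by
    simp only [beq_iff_eq, List.length_eq_zero_iff]; exact hpre
  obtain ⟨k, ks, hrle, hk⟩ := rle_cons (if pre.length % 2 == 0 then '0' else '1') 1 bits.toList
  have hruns := rleAcc bits.toList [] (if pre.length % 2 == 0 then '0' else '1') 1
  rw [hrle] at hruns
  unfold encode_manchester encode_manchester_alt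
  rw [if_neg hlen]
  simp only [List.tail_cons, List.head!_cons]
  rw [hruns]
  simp only [List.nil_append, List.head!_cons, List.tail_cons]
  exact (main_lemma pt bits.toList _ 1 pre k ks hrle).symm
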